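-- pv_equiv track=rewrite | github.com/owen-keating/CSCI-1133 | hw11/hw11.py | is_decoy
-- ===== SOURCE A (Python) =====
-- def is_decoy(list):
--     '''
--     Purpose: Searches through a list of lines in a text file and determines if the file is a decoy or not.
--     Input Parameter(s):
--         list: a list of strings, each item representing a line from a text file.
--     Return Value: Returns true if the file is a decoy, and false if the file is not a decoy.
--     '''
--     if(list==[]):
--         return False
--     elif(list[-1][0] in ['A','C','M','E']):
--         return True
--     else:
--         list.pop(-1)
--         return is_decoy(list)
-- ===== SOURCE B (Python) =====
-- def is_decoy(list):
--     while list: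
--         if list[-1][0] in ['A', 'C', 'M', 'E']:
--             return True
--         list.pop(-1)
--     return False
-- ===== Notes on version B (the rewrite author's own statement) =====
-- stated objective: simpler
-- what changed: Replaces A's tail recursion (pop the last line, recurse) with an explicit iterative while-loop over the same pop-from-the-end scan; same mutation of the argument list, no recursion.
import Mathlib
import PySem

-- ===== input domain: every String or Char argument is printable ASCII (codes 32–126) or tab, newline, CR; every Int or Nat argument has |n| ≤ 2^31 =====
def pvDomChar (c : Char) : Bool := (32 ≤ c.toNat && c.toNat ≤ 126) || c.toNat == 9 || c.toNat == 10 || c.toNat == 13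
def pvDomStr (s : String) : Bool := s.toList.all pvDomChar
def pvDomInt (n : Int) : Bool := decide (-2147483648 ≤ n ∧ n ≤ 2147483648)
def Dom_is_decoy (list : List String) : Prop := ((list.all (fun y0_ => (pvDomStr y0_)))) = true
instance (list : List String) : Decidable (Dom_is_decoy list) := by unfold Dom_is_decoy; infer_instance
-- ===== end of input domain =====

-- B rewrites A's tail recursion as an explicit while-loop over the same pop-from-the-end
-- scan (objective: simpler); both mutate the argument list identically (trailing
-- non-matching lines are popped); equivalence here is about the return value.


-- ===== PORT A =====
-- list.pop(-1) followed by the recursive call = recursion on list.dropLast.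
-- The two 'none' branches are Python IndexError sites, excluded by Pre_is_decoy.
def is_decoy (list : List String) : Bool :=
  if list = [] then false
  else
    match PySem.List.pyGet? list (-1) with
    | none => false            -- unreachable: list is nonempty
    | some s =>
      match PySem.Str.pyGet? s 0 with
      | none => false          -- Python raises IndexError here (empty line); outside Pre_
      | some c =>
        if c ∈ ['A', 'C', 'M', 'E'] then true
        else is_decoy list.dropLast
termination_by list.length
decreasing_by
  have : list ≠ [] := by assumption
  have : list.length ≠ 0 := fun hl => this (List.eq_nil_of_length_eq_zero hl)
  simp [List.length_dropLast]; omega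

-- ===== PORT B =====
-- the while-loop of Source B: pop from the end until a match; iterating the loop
-- body over the popped ends = a left-to-right walk over the reversed list.
def decoyLoop : List String → Bool
  | [] => false                -- while-condition fails: return False
  | s :: rest =>
    match PySem.Str.pyGet? s 0 with
    | none => false            -- Python raises IndexError here (empty line); outside Pre_
    | some c =>
      if c ∈ ['A', 'C', 'M', 'E'] then true
      else decoyLoop rest      -- list.pop(-1); next loop iteration

def is_decoy_alt (list : List String) : Bool := decoyLoop list.reverse

-- ===== PRECONDITION & SPEC =====
-- Pre_ excludes exactly the inputs on which Python A raises IndexError: those where some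
-- line is empty and no later line starts with A/C/M/E (the end-to-front scan then reaches
-- the empty line and 'list[-1][0]' fails).  B raises there too.
def Pre_is_decoy (list : List String) : Prop :=
  ∀ i < list.length, list.getD i "" = "" →
    ∃ j < list.length, i < j ∧ ((list.getD j "").toList.headD ' ') ∈ ['A', 'C', 'M', 'E']
instance (list : List String) : Decidable (Pre_is_decoy list) := by
  unfold Pre_is_decoy; infer_instance
def pvWitness_is_decoy : List String := (["hello", "Apple"])
def Spec_is_decoy (list : List String) (out : Bool) : Prop := out = is_decoy_alt list
instance (list : List String) (out : Bool) : Decidable (Spec_is_decoy list out) := by unfold Spec_is_decoy; infer_instance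

-- ===== CLAIM (what is proved, stated in full; the proofs are below) =====
def Claim_equal_is_decoy : Prop := ∀ (list : List String), Dom_is_decoy list → Pre_is_decoy list → Spec_is_decoy list (is_decoy list)

-- ===== LEMMAS AND PROOFS =====
-- The two ports agree on every input (both return false at the IndexError sites,
-- which Pre_ excludes anyway): A on l computes B's loop on l.reverse.
theorem is_decoy_reverse (r : List String) : is_decoy r.reverse = decoyLoop r := by
  induction r with
  | nil => simp [is_decoy, decoyLoop]
  | cons x rs ih =>
    rw [List.reverse_cons, is_decoy]
    have hne : rs.reverse ++ [x] ≠ [] := by simp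
    rw [if_neg hne, PySem.List.pyGet?_neg_one_append_singleton, List.dropLast_concat, ih]
    rfl

-- ===== VERDICT (by name: the statement is the Claim_ definition above) =====
theorem is_decoy_spec : Claim_equal_is_decoy := by
  intro l _ _
  unfold Spec_is_decoy is_decoy_alt
  have h := is_decoy_reverse l.reverse
  rwa [List.reverse_reverse] at h
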